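-- pv_equiv track=rewrite | github.com/dheerajck/HackerRank-Problems | set 2/jim and the jokes.py | find_dates_combinations
-- ===== SOURCE A (Python) =====
-- def find_dates_combinations(dates):
--
--     from math import comb
--
--     count_d = {}
--
--     for i in dates:
--         try:
--             date = i[1]
--             month = i[0]
--             decimal_representaion = int(str(date), month)
--         except ValueError:
--             continue
--
--         if decimal_representaion in count_d:
--             count_d[decimal_representaion] += 1
--         else:
--             count_d[decimal_representaion] = 1
--
--     c = 0
--     # only value is needed now
--     # keys are used to organise values
--     for value in count_d.values():
--         c += comb(value ,2)
--
--     return c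
-- ===== SOURCE B (Python) =====
-- def find_dates_combinations(dates):
--     vals = []
--     for i in dates:
--         try:
--             vals.append(int(str(i[1]), i[0]))
--         except ValueError:
--             continue
--     vals.sort()
--     c = 0
--     run = 0
--     prev = None
--     for v in vals:
--         if prev is not None and v == prev:
--             run += 1
--         else:
--             run = 0
--         c += run
--         prev = v
--     return c
-- ===== Notes on version B (the rewrite author's own statement) =====
-- stated objective: alternative
-- what changed: B replaces A's hash-count-then-comb strategy by sort-then-scan: it collects the parsed values, sorts them, and walks the sorted list once adding the current run length for each element equal to its predecessor (equal values are contiguous after sorting), so no dict and no math.comb are used.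
import Mathlib
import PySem

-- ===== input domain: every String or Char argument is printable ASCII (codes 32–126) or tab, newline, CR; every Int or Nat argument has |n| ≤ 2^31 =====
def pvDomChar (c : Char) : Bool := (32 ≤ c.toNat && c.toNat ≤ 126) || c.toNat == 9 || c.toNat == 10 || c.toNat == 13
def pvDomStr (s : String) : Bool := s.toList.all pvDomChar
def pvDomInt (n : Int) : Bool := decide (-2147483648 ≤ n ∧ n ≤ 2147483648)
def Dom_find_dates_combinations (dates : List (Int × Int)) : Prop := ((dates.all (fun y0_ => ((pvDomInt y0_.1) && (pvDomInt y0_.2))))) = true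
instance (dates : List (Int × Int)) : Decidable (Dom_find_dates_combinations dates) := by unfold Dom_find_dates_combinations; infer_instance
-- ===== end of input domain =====

-- B replaces A's hash-count-then-comb strategy by sort-then-scan: collect parsed values, sort,
-- walk once adding the current run length (equal values are contiguous after sorting); no dict,
-- no math.comb; objective: alternative (O(n log n) vs O(n), same result).

-- ===== PORT A =====
-- int(str(date), month): PySem.Int.ofStrBase? is exact (none = ValueError, incl. a bad base)
def pvParse (i : Int × Int) : Option Int := PySem.Int.ofStrBase? (PySem.Int.toStr i.2) i.1
-- math.comb(n, 2); every value it is applied to here is a count ≥ 1, where toNat is exact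
def pvComb (n : Int) : Int := (n.toNat.choose 2 : Int)

def find_dates_combinations (dates : List (Int × Int)) : Int :=
  let count_d : PySem.Dict Int Int :=
    dates.foldl (fun d i =>
      match pvParse i with
      | none => d
      | some v => if d.contains v then d.modify v 0 (· + 1) else d.insert v 1)
      PySem.Dict.empty
  count_d.values.foldl (fun c value => c + pvComb value) 0

-- ===== PORT B =====
-- one step of B's scan over the sorted values; state is (c, run, prev)
def pvScanStep (s : Int × Int × Option Int) (v : Int) : Int × Int × Option Int :=
  let run := match s.2.2 with
    | some p => if v = p then s.2.1 + 1 else 0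
    | none => 0
  (s.1 + run, run, some v)

def find_dates_combinations_alt (dates : List (Int × Int)) : Int :=
  let vals : List Int :=
    dates.foldl (fun acc i =>
      match pvParse i with
      | none => acc
      | some v => acc ++ [v]) []
  let sorted := PySem.List.sorted vals (fun x => x) false
  (sorted.foldl pvScanStep ((0 : Int), (0 : Int), (none : Option Int))).1

-- ===== PRECONDITION & SPEC =====
def Spec_find_dates_combinations (dates : List (Int × Int)) (out : Int) : Prop := out = find_dates_combinations_alt dates
instance (dates : List (Int × Int)) (out : Int) : Decidable (Spec_find_dates_combinations dates out) := by unfold Spec_find_dates_combinations; infer_instance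

-- ===== CLAIM (what is proved, stated in full; the proofs are below) =====
def Claim_equal_find_dates_combinations : Prop := ∀ (dates : List (Int × Int)), Dom_find_dates_combinations dates → Spec_find_dates_combinations dates (find_dates_combinations dates)

-- ===== LEMMAS AND PROOFS =====

-- Σ over the distinct values of C(count, 2): both programs' result is this quantity
def pvPairSum (vs : List Int) : Int :=
  ((PySem.Set.ofList vs).map (fun k => pvComb (vs.count k : Int))).sum

-- the continue-on-ValueError loops are folds over the successfully parsed values
theorem foldl_parse_filterMap {σ : Type} (g : σ → Int → σ) (dates : List (Int × Int)) (init : σ) :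
    dates.foldl (fun s i => match pvParse i with | none => s | some v => g s v) init
      = (dates.filterMap pvParse).foldl g init := by
  induction dates generalizing init with
  | nil => rfl
  | cons h t ih => cases hp : pvParse h <;> simp [hp, ih]

theorem stepA_eq_modify (d : PySem.Dict Int Int) (v : Int) :
    (if d.contains v then d.modify v 0 (· + 1) else d.insert v 1) = d.modify v 0 (· + 1) := by
  split
  · rfl
  · simp [PySem.Dict.modify, PySem.Dict.getD_of_not_contains, *]

theorem dictA_eq_counter (vs : List Int) :
    vs.foldl (fun d v => if d.contains v then d.modify v 0 (· + 1) else d.insert v 1) PySem.Dict.empty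
      = PySem.Dict.counter vs := by
  exact Eq.trans (PySem.List.foldl_congr_mem _ _ _ _ (fun acc x _ => stepA_eq_modify acc x))
    (PySem.Dict.counter_eq_foldl vs).symm

theorem values_counter (vs : List Int) :
    (PySem.Dict.counter vs).values = (PySem.Set.ofList vs).map (fun k => (vs.count k : Int)) := by
  simp only [PySem.Dict.values, PySem.Dict.items_counter, List.map_map]
  rfl

theorem sum_map_update (l : List Int) (f g : Int → Int) (v : Int) (hnd : l.Nodup) (hv : v ∈ l)
    (hne : ∀ k ∈ l, k ≠ v → g k = f k) :
    (l.map g).sum = (l.map f).sum + (g v - f v) := by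
  induction l with
  | nil => cases hv
  | cons h t ih =>
    rcases List.mem_cons.1 hv with rfl | hv'
    · have ht : ∀ k ∈ t, g k = f k := fun k hk =>
        hne k (List.mem_cons_of_mem _ hk) (by rintro rfl; exact (List.nodup_cons.1 hnd).1 hk)
      simp [List.map_congr_left ht]; ring
    · have hh : g h = f h := hne h (List.mem_cons_self ..)
        (by rintro rfl; exact (List.nodup_cons.1 hnd).1 hv')
      have := ih (List.nodup_cons.1 hnd).2 hv' (fun k hk => hne k (List.mem_cons_of_mem _ hk))
      simp [hh, this]; ring

theorem pvComb_cast (n : Nat) : pvComb (n : Int) = (n.choose 2 : Int) := by simp [pvComb]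

theorem pvComb_succ (n : Nat) : pvComb ((n : Int) + 1) = pvComb (n : Int) + n := by
  have h : ((n : Int) + 1) = ((n + 1 : Nat) : Int) := by push_cast; ring
  rw [h, pvComb_cast, pvComb_cast, Nat.choose_succ_succ]
  push_cast [Nat.choose_one_right]; ring

theorem ofList_append_singleton (vs : List Int) (v : Int) :
    PySem.Set.ofList (vs ++ [v]) = PySem.Set.add (PySem.Set.ofList vs) v := by
  rw [PySem.Set.ofList_eq_foldl, PySem.Set.ofList_eq_foldl, List.foldl_append]
  rfl

-- appending one value adds to pvPairSum the number of earlier copies of that value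
theorem pvPairSum_append (vs : List Int) (v : Int) :
    pvPairSum (vs ++ [v]) = pvPairSum vs + (vs.count v : Int) := by
  unfold pvPairSum
  rw [ofList_append_singleton]
  by_cases hv : v ∈ vs
  · have hmem : v ∈ PySem.Set.ofList vs := (PySem.Set.mem_ofList ..).2 hv
    have hadd : PySem.Set.add (PySem.Set.ofList vs) v = PySem.Set.ofList vs := by
      simp [PySem.Set.add, PySem.Set.contains, hmem]
    rw [hadd]
    rw [sum_map_update (PySem.Set.ofList vs)
        (fun k => pvComb (vs.count k : Int))
        (fun k => pvComb ((vs ++ [v]).count k : Int)) v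
        (PySem.Set.nodup_ofList vs) hmem
        (by intro k _ hk; simp [List.count_append, Ne.symm hk])]
    have hc : ((vs ++ [v]).count v : Int) = (vs.count v : Int) + 1 := by
      simp [List.count_append]
    simp only [hc, pvComb_succ]
    ring
  · have hmem : v ∉ PySem.Set.ofList vs := fun h => hv ((PySem.Set.mem_ofList ..).1 h)
    have hadd : PySem.Set.add (PySem.Set.ofList vs) v = PySem.Set.ofList vs ++ [v] := by
      simp [PySem.Set.add, PySem.Set.contains, hmem]
    have hcount0 : vs.count v = 0 := List.count_eq_zero_of_not_mem hv
    rw [hadd, List.map_append, List.sum_append]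
    have hcongr : ∀ k ∈ PySem.Set.ofList vs,
        pvComb ((vs ++ [v]).count k : Int) = pvComb (vs.count k : Int) := by
      intro k hk
      have : k ≠ v := fun h => hv (h ▸ (PySem.Set.mem_ofList ..).1 hk)
      simp [List.count_append, Ne.symm this]
    rw [List.map_congr_left (fun k hk => hcongr k hk)]
    simp [List.count_append, pvComb, hcount0]

-- pvPairSum only depends on the multiset of values
theorem pvPairSum_perm (vs ws : List Int) (h : vs.Perm ws) : pvPairSum vs = pvPairSum ws := by
  unfold pvPairSum
  have hset : (PySem.Set.ofList vs).Perm (PySem.Set.ofList ws) := by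
    refine (List.perm_ext_iff_of_nodup (PySem.Set.nodup_ofList vs) (PySem.Set.nodup_ofList ws)).2 ?_
    intro a
    rw [PySem.Set.mem_ofList, PySem.Set.mem_ofList]
    exact h.mem_iff
  have hcnt : ∀ k ∈ PySem.Set.ofList vs,
      pvComb (vs.count k : Int) = pvComb (ws.count k : Int) := by
    intro k _; rw [h.count_eq]
  rw [List.map_congr_left hcnt]
  exact (hset.map _).sum_eq

-- in a ≤-sorted list every element is ≤ the last one
theorem mem_le_getLast? (xs : List Int) (h : xs.Pairwise (· ≤ ·)) (v : Int) (hv : v ∈ xs) :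
    ∀ p, xs.getLast? = some p → v ≤ p := by
  induction xs with
  | nil => cases hv
  | cons a t ih =>
    intro p hp
    rcases List.mem_cons.1 hv with rfl | hv'
    · cases t with
      | nil => simp at hp; omega
      | cons b u =>
        have hpmem : p ∈ b :: u := List.mem_of_getLast? (by simpa using hp)
        exact (List.pairwise_cons.1 h).1 p hpmem
    · cases t with
      | nil => cases hv'
      | cons b u =>
        exact ih (List.pairwise_cons.1 h).2 hv' p (by simpa using hp)

-- the heart: on a ≤-sorted list, B's scan computes pvPairSum (with last element and its run count)
theorem scan_invariant (xs : List Int) (h : xs.Pairwise (· ≤ ·)) :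
    xs.foldl pvScanStep ((0 : Int), (0 : Int), (none : Option Int))
      = (pvPairSum xs,
         (match xs.getLast? with | none => 0 | some p => (xs.count p : Int) - 1),
         xs.getLast?) := by
  induction xs using List.reverseRecOn with
  | nil => rfl
  | append_singleton xs v ih =>
    have hsplit := List.pairwise_append.1 h
    have hxs : xs.Pairwise (· ≤ ·) := hsplit.1
    have hle : ∀ x ∈ xs, x ≤ v := fun x hx => hsplit.2.2 x hx v (List.mem_singleton_self v)
    rw [List.foldl_append, ih hxs]
    have hlast : (xs ++ [v]).getLast? = some v := by simp
    rw [pvPairSum_append, hlast]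
    cases hxl : xs.getLast? with
    | none =>
      have hnil : xs = [] := List.getLast?_eq_none_iff.1 hxl
      subst hnil
      simp [pvScanStep]
    | some p =>
      by_cases hvp : v = p
      · subst hvp
        have hmem : v ∈ xs := List.mem_of_getLast? hxl
        have hc : (xs ++ [v]).count v = xs.count v + 1 := by simp
        simp only [List.foldl_cons, List.foldl_nil, pvScanStep, hc]
        push_cast
        simp only [Prod.mk.injEq]
        exact ⟨by ring, by ring, trivial⟩
      · have hnot : v ∉ xs := by
          intro hmem
          exact hvp (le_antisymm (mem_le_getLast? xs hxs v hmem p hxl)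
            (hle p (List.mem_of_getLast? hxl)))
        have hc0 : xs.count v = 0 := List.count_eq_zero_of_not_mem hnot
        have hc : (xs ++ [v]).count v = 1 := by simp [hc0]
        simp [pvScanStep, hvp, hc0, hc]

-- ===== VERDICT (by name: the statement is the Claim_ definition above) =====
theorem find_dates_combinations_spec : Claim_equal_find_dates_combinations := by
  intro dates _
  unfold Spec_find_dates_combinations find_dates_combinations find_dates_combinations_alt
  dsimp only
  rw [foldl_parse_filterMap, foldl_parse_filterMap, dictA_eq_counter]
  set vs := dates.filterMap pvParse with hvs
  have hvals : vs.foldl (fun acc v => acc ++ [v]) [] = vs := by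
    induction vs using List.reverseRecOn with
    | nil => rfl
    | append_singleton l v ih => rw [List.foldl_append]; simp [ih]
  rw [hvals]
  have hsortp : (PySem.List.sorted vs (fun x => x) false).Perm vs := PySem.List.sorted_perm ..
  have hsorted : (PySem.List.sorted vs (fun x => x) false).Pairwise (· ≤ ·) := by
    have := PySem.List.sorted_pairwise vs (fun x => x)
    simpa using this
  rw [scan_invariant _ hsorted]
  have hA : (PySem.Dict.counter vs).values.foldl (fun c value => c + pvComb value) 0
      = pvPairSum vs := by
    rw [values_counter, PySem.List.foldl_add]
    simp [pvPairSum, List.map_map, Function.comp_def]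
  simp only [hA]
  exact (pvPairSum_perm _ _ hsortp).symm
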